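-- pv_equiv track=rewrite | github.com/alicelieutier/aoc2024 | 12/solution.py | part_1
-- ===== SOURCE A (Python) =====
-- from collections import deque
--
-- class Grid:
--   def __init__(self, string):
--     self.grid = [line for line in string.split('\n') if line != '']
--     self.height = len(self.grid)
--     self.width = len(self.grid[0])
--
--   # Virtually pad the grid
--   def get(self, pos):
--     x, y = pos
--     if 0 <= x < self.width and 0 <= y < self.height:
--       return self.grid[y][x]
--     return None
--
--   def neighbours(self, pos):
--     x,y = pos
--     yield (x-1, y)
--     yield (x+1, y)
--     yield (x, y-1)
--     yield (x, y+1)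
--
--   def explore_region(self, pos):
--     plant = self.get(pos)
--     plots = set()
--     perimeter = 0
--     edges= set()
--     to_visit = deque([pos])
--     while len(to_visit) > 0:
--       current = to_visit.popleft()
--       if current in plots:
--         continue
--       plots.add(current)
--       for neighbour in self.neighbours(current):
--         if neighbour not in plots:
--           if self.get(neighbour) == plant:
--             to_visit.append(neighbour)
--           else:
--             perimeter += 1
--             edges.add((current, neighbour))
--     return plots, len(plots), perimeter, edges
--
-- def part_1(string):
--   grid = Grid(string)
--   visited_plots = set()
--   price = 0
--   for y in range(grid.height):
--     for x in range(grid.width):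
--       if (x,y) not in visited_plots:
--         plots, area, perimeter, _ = grid.explore_region((x,y))
--         visited_plots |= plots
--         price += area * perimeter
--   return price
-- ===== SOURCE B (Python) =====
-- def part_1(string):
--   lines = [line for line in string.split('\n') if line != '']
--   height = len(lines)
--   width = len(lines[0])
--
--   def get(x, y):
--     if 0 <= x < width and 0 <= y < height:
--       return lines[y][x]
--     return None
--
--   def neighbours(x, y):
--     return ((x - 1, y), (x + 1, y), (x, y - 1), (x, y + 1))
--
--   def region(x, y, plant):
--     # grow the region to its fixpoint by whole-set saturation
--     cells = {(x, y)}
--     while True: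
--       grown = {n for c in cells for n in neighbours(*c)
--                if n not in cells and get(*n) == plant}
--       if not grown:
--         break
--       cells |= grown
--     return cells
--
--   visited = set()
--   price = 0
--   for y in range(height):
--     for x in range(width):
--       if (x, y) not in visited:
--         plant = get(x, y)
--         cells = region(x, y, plant)
--         area = len(cells)
--         perimeter = sum(1 for c in cells for n in neighbours(*c)
--                         if get(*n) != plant)
--         visited |= cells
--         price += area * perimeter
--   return price
-- ===== Notes on version B (the rewrite author's own statement) =====
-- stated objective: alternative
-- what changed: Replaces A's per-cell BFS-queue flood fill (perimeter incremented edge by edge while visiting, visited set returned from the explorer) by a whole-set fixpoint saturation that grows each region in rounds, with the perimeter computed afterwards as a closed-form sum of per-cell boundary counts.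
import Mathlib
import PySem

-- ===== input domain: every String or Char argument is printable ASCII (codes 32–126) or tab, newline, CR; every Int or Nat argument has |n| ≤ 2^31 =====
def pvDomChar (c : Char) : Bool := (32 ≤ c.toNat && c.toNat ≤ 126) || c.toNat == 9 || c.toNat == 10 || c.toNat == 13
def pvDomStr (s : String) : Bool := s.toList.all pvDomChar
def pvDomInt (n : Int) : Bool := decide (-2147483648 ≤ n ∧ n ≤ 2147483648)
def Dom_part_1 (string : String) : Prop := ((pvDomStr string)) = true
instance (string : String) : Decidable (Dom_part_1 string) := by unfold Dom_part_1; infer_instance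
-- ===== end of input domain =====

-- B replaces A's per-cell BFS-queue flood fill (perimeter counted edge by edge during the visit) by a
-- whole-set fixpoint saturation of each region plus a closed-form perimeter (sum of per-cell boundary
-- counts); objective: alternative (not claimed faster). Return values agree on all inputs where A returns.

-- ===== PORT A =====
-- [line for line in string.split('\n') if line != ''] (lines kept as List Char for indexing)
def pvGrid (string : String) : List (List Char) :=
  (PySem.Chars.splitOn string.toList ['\n']).filter (fun l => l ≠ [])

-- Grid.get: virtually padded lookup (inside Pre_ the inner indexing never fails; out of bounds = none)
def pvGet (g : List (List Char)) (W H : Int) (p : Int × Int) : Option Char :=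
  if 0 ≤ p.1 ∧ p.1 < W ∧ 0 ≤ p.2 ∧ p.2 < H then
    (PySem.List.pyGet? g p.2).bind (fun row => PySem.List.pyGet? row p.1)
  else none

def pvNbrs (p : Int × Int) : List (Int × Int) :=
  [(p.1 - 1, p.2), (p.1 + 1, p.2), (p.1, p.2 - 1), (p.1, p.2 + 1)]

-- body of 'for neighbour in self.neighbours(current)': state = (perimeter, edges, to_visit)
def pvAStep (g : List (List Char)) (W H : Int) (plant : Option Char)
    (plots : PySem.Set (Int × Int)) (current : Int × Int)
    (st : Int × PySem.Set ((Int × Int) × (Int × Int)) × List (Int × Int)) (n : Int × Int) :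
    Int × PySem.Set ((Int × Int) × (Int × Int)) × List (Int × Int) :=
  if n ∈ plots then st
  else if pvGet g W H n == plant then (st.1, st.2.1, st.2.2 ++ [n])
  else (st.1 + 1, PySem.Set.add st.2.1 (current, n), st.2.2)

-- the 'while len(to_visit) > 0' loop (fuel-bounded; 5*W*H+2 fuel is proven sufficient below)
def pvAbfs (g : List (List Char)) (W H : Int) (plant : Option Char) :
    Nat → PySem.Set (Int × Int) → Int → PySem.Set ((Int × Int) × (Int × Int)) → List (Int × Int) →
    PySem.Set (Int × Int) × Int × PySem.Set ((Int × Int) × (Int × Int))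
  | 0, plots, perim, edges, _ => (plots, perim, edges)
  | fuel + 1, plots, perim, edges, queue =>
    match queue with
    | [] => (plots, perim, edges)
    | current :: rest =>
      if current ∈ plots then pvAbfs g W H plant fuel plots perim edges rest
      else
        let plots' := PySem.Set.add plots current
        let st := (pvNbrs current).foldl (pvAStep g W H plant plots' current) (perim, edges, rest)
        pvAbfs g W H plant fuel plots' st.1 st.2.1 st.2.2

-- explore_region: returns (plots, len(plots), perimeter); the edges set is dropped as A's caller does
def pvAexplore (g : List (List Char)) (W H : Int) (pos : Int × Int) :
    PySem.Set (Int × Int) × Int × Int :=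
  let plant := pvGet g W H pos
  let r := pvAbfs g W H plant (5 * (W * H).toNat + 2) PySem.Set.empty 0 PySem.Set.empty [pos]
  (r.1, (r.1.length : Int), r.2.1)

def part_1 (string : String) : Int :=
  let g := pvGrid string
  let H : Int := (g.length : Int)
  let W : Int := ((g.headD []).length : Int)  -- grid[0]: inside Pre_ g ≠ []; outside, A raises
  ((PySem.List.pyRange 0 H 1).foldl (fun (st : PySem.Set (Int × Int) × Int) y =>
    (PySem.List.pyRange 0 W 1).foldl (fun (st : PySem.Set (Int × Int) × Int) x =>
      if (x, y) ∈ st.1 then st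
      else
        let r := pvAexplore g W H (x, y)
        (PySem.Set.union st.1 r.1, st.2 + r.2.1 * r.2.2)) st)
    (PySem.Set.empty, 0)).2

-- ===== PORT B =====
-- {n for c in cells for n in neighbours(*c) if n not in cells and get(*n) == plant}
def pvBgrow (g : List (List Char)) (W H : Int) (plant : Option Char)
    (cells : PySem.Set (Int × Int)) : PySem.Set (Int × Int) :=
  cells.foldl (fun acc c =>
    (pvNbrs c).foldl (fun acc n =>
      if !(PySem.Set.contains cells n) && (pvGet g W H n == plant)
      then PySem.Set.add acc n else acc) acc) PySem.Set.empty

-- the 'while True' saturation loop (fuel-bounded; W*H+1 fuel is proven sufficient below)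
def pvBsat (g : List (List Char)) (W H : Int) (plant : Option Char) :
    Nat → PySem.Set (Int × Int) → PySem.Set (Int × Int)
  | 0, cells => cells
  | fuel + 1, cells =>
    let grown := pvBgrow g W H plant cells
    if grown = [] then cells else pvBsat g W H plant fuel (PySem.Set.union cells grown)

def pvBregion (g : List (List Char)) (W H : Int) (pos : Int × Int) (plant : Option Char) :
    PySem.Set (Int × Int) :=
  pvBsat g W H plant ((W * H).toNat + 1) (PySem.Set.add PySem.Set.empty pos)

-- sum(1 for c in cells for n in neighbours(*c) if get(*n) != plant)
def pvBperim (g : List (List Char)) (W H : Int) (plant : Option Char)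
    (cells : List (Int × Int)) : Int :=
  cells.foldl (fun acc c =>
    acc + (((pvNbrs c).filter (fun n => !(pvGet g W H n == plant))).length : Int)) 0

def part_1_alt (string : String) : Int :=
  let g := pvGrid string
  let H : Int := (g.length : Int)
  let W : Int := ((g.headD []).length : Int)
  ((PySem.List.pyRange 0 H 1).foldl (fun (st : PySem.Set (Int × Int) × Int) y =>
    (PySem.List.pyRange 0 W 1).foldl (fun (st : PySem.Set (Int × Int) × Int) x =>
      if (x, y) ∈ st.1 then st
      else
        let plant := pvGet g W H (x, y)
        let cells := pvBregion g W H (x, y) plant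
        (PySem.Set.union st.1 cells, st.2 + (cells.length : Int) * pvBperim g W H plant cells)) st)
    (PySem.Set.empty, 0)).2

-- ===== PRECONDITION & SPEC =====
-- Pre_ holds exactly where A returns: at least one non-empty line (else grid[0] raises IndexError)
-- and no kept line shorter than the first (else grid[y][x] raises IndexError for some x < width).
def Pre_part_1 (string : String) : Prop :=
  pvGrid string ≠ [] ∧ ∀ l ∈ pvGrid string, ((pvGrid string).headD []).length ≤ l.length
instance (string : String) : Decidable (Pre_part_1 string) := by unfold Pre_part_1; infer_instance

def pvWitness_part_1 : String := "AAB\nBBB"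

def Spec_part_1 (string : String) (out : Int) : Prop := out = part_1_alt string
instance (string : String) (out : Int) : Decidable (Spec_part_1 string out) := by unfold Spec_part_1; infer_instance

-- ===== CLAIM (what is proved, stated in full; the proofs are below) =====
def Claim_equal_part_1 : Prop := ∀ (string : String), Dom_part_1 string → Pre_part_1 string → Spec_part_1 string (part_1 string)

-- ===== LEMMAS AND PROOFS =====

-- in-bounds predicate, plant-adjacency, reachability (the region of a seed), per-cell boundary count
def pvInB (W H : Int) (p : Int × Int) : Prop := 0 ≤ p.1 ∧ p.1 < W ∧ 0 ≤ p.2 ∧ p.2 < H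
def pvAdj (g : List (List Char)) (W H : Int) (plant : Option Char) (a b : Int × Int) : Prop :=
  b ∈ pvNbrs a ∧ pvGet g W H b = plant
def pvReach (g : List (List Char)) (W H : Int) (plant : Option Char) (s q : Int × Int) : Prop :=
  Relation.ReflTransGen (pvAdj g W H plant) s q
def pvBnd (g : List (List Char)) (W H : Int) (plant : Option Char) (d : Int × Int) : Nat :=
  (pvNbrs d).countP (fun n => !(pvGet g W H n == plant))

theorem pvAget_some_inB {g : List (List Char)} {W H : Int} {p : Int × Int} {c : Char}
    (h : pvGet g W H p = some c) : pvInB W H p := by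
  unfold pvGet at h; unfold pvInB
  split at h
  · assumption
  · exact absurd h (by simp)

theorem nodup_inb_length_le (W H : Int) (l : List (Int × Int)) (hnd : l.Nodup)
    (hin : ∀ p ∈ l, pvInB W H p) : l.length ≤ (W * H).toNat := by
  by_cases hW : 0 ≤ W
  · by_cases hH : 0 ≤ H
    · have hsub : l.toFinset ⊆ Finset.Ico 0 W ×ˢ Finset.Ico 0 H := by
        intro p hp
        have := hin p (List.mem_toFinset.mp hp)
        simp [Finset.mem_product, Finset.mem_Ico]
        exact ⟨⟨this.1, this.2.1⟩, this.2.2⟩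
      have h1 : l.toFinset.card ≤ (Finset.Ico 0 W ×ˢ Finset.Ico 0 H).card := Finset.card_le_card hsub
      have h2 : (Finset.Ico 0 W ×ˢ Finset.Ico 0 H).card = W.toNat * H.toNat := by
        simp [Finset.card_product, Int.card_Ico]
      have h3 : l.toFinset.card = l.length := List.toFinset_card_of_nodup hnd
      have h4 : (W * H).toNat = W.toNat * H.toNat := Int.toNat_mul hW hH
      omega
    · cases l with
      | nil => simp
      | cons a t => exact absurd (hin a (by simp)) (by unfold pvInB; omega)
  · cases l with
    | nil => simp
    | cons a t => exact absurd (hin a (by simp)) (by unfold pvInB; omega)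

-- the neighbour fold of A: queue gets the fresh plant neighbours appended, perimeter counts the rest
theorem pvAStep_foldl (g : List (List Char)) (W H : Int) (plant : Option Char)
    (plots' : PySem.Set (Int × Int)) (current : Int × Int) (ns : List (Int × Int))
    (perim : Int) (edges : PySem.Set ((Int × Int) × (Int × Int))) (rest : List (Int × Int)) :
    (ns.foldl (pvAStep g W H plant plots' current) (perim, edges, rest)).2.2
      = rest ++ ns.filter (fun n => decide (n ∉ plots') && (pvGet g W H n == plant)) ∧
    (ns.foldl (pvAStep g W H plant plots' current) (perim, edges, rest)).1
      = perim + (ns.countP (fun n => decide (n ∉ plots') && !(pvGet g W H n == plant)) : Int) := by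
  induction ns generalizing perim edges rest with
  | nil => simp
  | cons n ns ih =>
    by_cases h1 : n ∈ plots'
    · have hstep : pvAStep g W H plant plots' current (perim, edges, rest) n = (perim, edges, rest) := by
        simp [pvAStep, h1]
      simp only [List.foldl_cons, hstep]
      obtain ⟨ha, hb⟩ := ih perim edges rest
      refine ⟨by rw [ha]; simp [h1], by rw [hb]; simp [h1]⟩
    · by_cases h2 : (pvGet g W H n == plant) = true
      · have hstep : pvAStep g W H plant plots' current (perim, edges, rest) n
            = (perim, edges, rest ++ [n]) := by
          simp [pvAStep, h1, h2]
        simp only [List.foldl_cons, hstep]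
        obtain ⟨ha, hb⟩ := ih perim edges (rest ++ [n])
        refine ⟨by rw [ha]; simp [h1, h2],
                by rw [hb]; simp [h1, h2]⟩
      · have hstep : pvAStep g W H plant plots' current (perim, edges, rest) n
            = (perim + 1, PySem.Set.add edges (current, n), rest) := by
          simp [pvAStep, h1, h2]
        simp only [List.foldl_cons, hstep]
        obtain ⟨ha, hb⟩ := ih (perim + 1) (PySem.Set.add edges (current, n)) rest
        refine ⟨by rw [ha]; simp [h1, h2], ?_⟩
        rw [hb]
        simp only [List.countP_cons, h1, h2]
        simp
        ring

-- characterisation of A's BFS loop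
theorem pvAbfs_spec (g : List (List Char)) (W H : Int) (ch : Char) (plant : Option Char)
    (hch : plant = some ch) :
    ∀ (fuel : Nat) (plots : PySem.Set (Int × Int)) (perim : Int)
      (edges : PySem.Set ((Int × Int) × (Int × Int))) (queue : List (Int × Int)),
    plots.Nodup →
    (∀ q ∈ plots, pvGet g W H q = plant) →
    (∀ q ∈ queue, pvGet g W H q = plant) →
    (∀ p ∈ plots, ∀ n ∈ pvNbrs p, pvGet g W H n = plant → n ∈ plots ∨ n ∈ queue) →
    5 * ((W * H).toNat - plots.length) + queue.length < fuel →
    (pvAbfs g W H plant fuel plots perim edges queue).1.Nodup ∧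
    (∀ q ∈ queue, q ∈ (pvAbfs g W H plant fuel plots perim edges queue).1) ∧
    (∀ q ∈ (pvAbfs g W H plant fuel plots perim edges queue).1,
        q ∈ plots ∨ ∃ s ∈ queue, pvReach g W H plant s q) ∧
    (∀ p ∈ (pvAbfs g W H plant fuel plots perim edges queue).1, ∀ n ∈ pvNbrs p,
        pvGet g W H n = plant → n ∈ (pvAbfs g W H plant fuel plots perim edges queue).1) ∧
    (∀ q ∈ (pvAbfs g W H plant fuel plots perim edges queue).1, pvGet g W H q = plant) ∧
    (∃ Δ, (pvAbfs g W H plant fuel plots perim edges queue).1 = plots ++ Δ ∧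
      (pvAbfs g W H plant fuel plots perim edges queue).2.1
        = perim + ((Δ.map (fun d => (pvBnd g W H plant d : Int))).sum)) := by
  intro fuel
  induction fuel with
  | zero => intro plots perim edges queue hnd hpl hq hcl hf; omega
  | succ f ih =>
    intro plots perim edges queue hnd hpl hq hcl hf
    match queue with
    | [] =>
      simp only [pvAbfs]
      exact ⟨hnd, by simp, fun q hq' => Or.inl hq',
        fun p hp n hn hplant => (hcl p hp n hn hplant).resolve_right (by simp),
        hpl, ⟨[], by simp, by simp⟩⟩
    | current :: rest =>
      by_cases hc : current ∈ plots
      · simp only [pvAbfs, if_pos hc]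
        have hcl' : ∀ p ∈ plots, ∀ n ∈ pvNbrs p, pvGet g W H n = plant →
            n ∈ plots ∨ n ∈ rest := by
          intro p hp n hn hplant
          rcases hcl p hp n hn hplant with h | h
          · exact Or.inl h
          · rcases List.mem_cons.mp h with rfl | h
            · exact Or.inl hc
            · exact Or.inr h
        have hf' : 5 * ((W * H).toNat - plots.length) + rest.length < f := by
          simp only [List.length_cons] at hf; omega
        obtain ⟨i1, i2, i3, i4, i5, i6⟩ :=
          ih plots perim edges rest hnd hpl (fun q hq' => hq q (List.mem_cons_of_mem _ hq')) hcl' hf'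
        refine ⟨i1, ?_, ?_, i4, i5, i6⟩
        · intro q hq'
          rcases List.mem_cons.mp hq' with rfl | h
          · obtain ⟨Δ, hΔ, _⟩ := i6
            rw [hΔ]; exact List.mem_append_left _ hc
          · exact i2 q h
        · intro q hq'
          rcases i3 q hq' with h | ⟨s, hs, hr⟩
          · exact Or.inl h
          · exact Or.inr ⟨s, List.mem_cons_of_mem _ hs, hr⟩
      · have hadd : PySem.Set.add plots current = plots ++ [current] :=
          PySem.Set.add_of_not_mem hc
        simp only [pvAbfs, if_neg hc, hadd]
        obtain ⟨hqeq, hpeq⟩ :=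
          pvAStep_foldl g W H plant (plots ++ [current]) current (pvNbrs current) perim edges rest
        rw [hqeq, hpeq]
        have hcur : pvGet g W H current = plant := hq current (by simp)
        have hnd' : (plots ++ [current]).Nodup := by
          rw [List.nodup_append]
          exact ⟨hnd, List.nodup_singleton _,
            by intro a ha b hb; rw [List.mem_singleton.mp hb]; exact fun he => hc (he ▸ ha)⟩
        have hpl' : ∀ q ∈ plots ++ [current], pvGet g W H q = plant := by
          intro q hq'
          rcases List.mem_append.mp hq' with h | h
          · exact hpl q h
          · simp at h; subst h; exact hcur
        have happlen : ((pvNbrs current).filter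
            (fun n => decide (n ∉ plots ++ [current]) && (pvGet g W H n == plant))).length ≤ 4 := by
          have := List.length_filter_le
            (fun n => decide (n ∉ plots ++ [current]) && (pvGet g W H n == plant)) (pvNbrs current)
          simpa [pvNbrs] using this
        have hle : (plots ++ [current]).length ≤ (W * H).toNat := by
          refine nodup_inb_length_le W H _ hnd' (fun q hq' => ?_)
          have := hpl' q hq'
          rw [hch] at this
          exact pvAget_some_inB this
        have hq'' : ∀ q ∈ rest ++ (pvNbrs current).filter
            (fun n => decide (n ∉ plots ++ [current]) && (pvGet g W H n == plant)),
            pvGet g W H q = plant := by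
          intro q hq'
          rcases List.mem_append.mp hq' with h | h
          · exact hq q (List.mem_cons_of_mem _ h)
          · have := List.of_mem_filter h
            exact eq_of_beq (Bool.and_elim_right this)
        have hcl'' : ∀ p ∈ plots ++ [current], ∀ n ∈ pvNbrs p, pvGet g W H n = plant →
            n ∈ plots ++ [current] ∨ n ∈ rest ++ (pvNbrs current).filter
              (fun n => decide (n ∉ plots ++ [current]) && (pvGet g W H n == plant)) := by
          intro p hp n hn hplant
          rcases List.mem_append.mp hp with h | h
          · rcases hcl p h n hn hplant with h' | h'
            · exact Or.inl (List.mem_append_left _ h')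
            · rcases List.mem_cons.mp h' with rfl | h''
              · exact Or.inl (List.mem_append_right _ (by simp))
              · exact Or.inr (List.mem_append_left _ h'')
          · have hpcur : p = current := by simpa using h
            by_cases hnp : n ∈ plots ++ [current]
            · exact Or.inl hnp
            · refine Or.inr (List.mem_append_right _
                (List.mem_filter.mpr ⟨by rw [← hpcur]; exact hn, ?_⟩))
              have h1 : n ∉ plots := fun hmem => hnp (List.mem_append_left _ hmem)
              have h2 : n ≠ current := fun he => hnp (List.mem_append_right _ (by simp [he]))
              simp [h1, h2, hplant]
        have hf' : 5 * ((W * H).toNat - (plots ++ [current]).length) +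
            (rest ++ (pvNbrs current).filter
              (fun n => decide (n ∉ plots ++ [current]) && (pvGet g W H n == plant))).length < f := by
          rw [List.length_append]
          simp only [List.length_append, List.length_cons, List.length_nil] at hf hle ⊢
          omega
        obtain ⟨i1, i2, i3, i4, i5, Δ, hΔ, hperim⟩ :=
          ih (plots ++ [current])
            (perim + ((pvNbrs current).countP
              (fun n => decide (n ∉ plots ++ [current]) && !(pvGet g W H n == plant)) : Int))
            ((pvNbrs current).foldl
              (pvAStep g W H plant (plots ++ [current]) current) (perim, edges, rest)).2.1
            (rest ++ (pvNbrs current).filter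
              (fun n => decide (n ∉ plots ++ [current]) && (pvGet g W H n == plant)))
            hnd' hpl' hq'' hcl'' hf'
        have hcnt : (pvNbrs current).countP
            (fun n => decide (n ∉ plots ++ [current]) && !(pvGet g W H n == plant))
            = pvBnd g W H plant current := by
          unfold pvBnd
          refine List.countP_congr (fun n _ => ?_)
          by_cases hbp : (pvGet g W H n == plant) = true
          · simp [hbp]
          · have : n ∉ plots ++ [current] := fun hmem =>
              hbp (beq_iff_eq.mpr (hpl' n hmem))
            simp [hbp, this]
        refine ⟨i1, ?_, ?_, i4, i5, [current] ++ Δ, by rw [hΔ, List.append_assoc], ?_⟩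
        · intro q hq'
          rcases List.mem_cons.mp hq' with rfl | h
          · rw [hΔ]; exact List.mem_append_left _ (List.mem_append_right _ (by simp))
          · exact i2 q (List.mem_append_left _ h)
        · intro q hq'
          rcases i3 q hq' with h | ⟨s, hs, hr⟩
          · rcases List.mem_append.mp h with h' | h'
            · exact Or.inl h'
            · simp at h'; subst h'
              exact Or.inr ⟨q, by simp, Relation.ReflTransGen.refl⟩
          · rcases List.mem_append.mp hs with h' | h'
            · exact Or.inr ⟨s, List.mem_cons_of_mem _ h', hr⟩
            · have hfil := List.mem_filter.mp h'
              have hadj : pvAdj g W H plant current s :=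
                ⟨hfil.1, eq_of_beq (Bool.and_elim_right hfil.2)⟩
              exact Or.inr ⟨current, by simp, Relation.ReflTransGen.head hadj hr⟩
        · rw [hperim, hcnt]
          simp [List.map_cons, List.sum_cons]
          ring

theorem reach_subset_of_closed (g : List (List Char)) (W H : Int) (plant : Option Char)
    (S : List (Int × Int)) (pos : Int × Int) (hpos : pos ∈ S)
    (hcl : ∀ p ∈ S, ∀ n ∈ pvNbrs p, pvGet g W H n = plant → n ∈ S)
    (q : Int × Int) (h : pvReach g W H plant pos q) : q ∈ S := by
  induction h with
  | refl => exact hpos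
  | tail _ hadj ih => exact hcl _ ih _ hadj.1 hadj.2

theorem pvAexplore_spec (g : List (List Char)) (W H : Int) (pos : Int × Int) (ch : Char)
    (h : pvGet g W H pos = some ch) :
    (pvAexplore g W H pos).1.Nodup ∧
    (∀ q, q ∈ (pvAexplore g W H pos).1 ↔ pvReach g W H (some ch) pos q) ∧
    (pvAexplore g W H pos).2.1 = ((pvAexplore g W H pos).1.length : Int) ∧
    (pvAexplore g W H pos).2.2
      = (((pvAexplore g W H pos).1.map (fun d => (pvBnd g W H (some ch) d : Int))).sum) := by
  have hkey := pvAbfs_spec g W H ch (some ch) rfl (5 * (W * H).toNat + 2)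
    PySem.Set.empty 0 PySem.Set.empty [pos] List.nodup_nil (by simp [PySem.Set.empty])
    (by intro q hq; rw [List.mem_singleton.mp hq]; exact h) (by simp [PySem.Set.empty])
    (by simp only [PySem.Set.empty, List.length_nil, List.length_cons]; omega)
  have hexp : pvAexplore g W H pos =
      ((pvAbfs g W H (some ch) (5 * (W * H).toNat + 2) PySem.Set.empty 0 PySem.Set.empty [pos]).1,
       ((pvAbfs g W H (some ch) (5 * (W * H).toNat + 2) PySem.Set.empty 0 PySem.Set.empty [pos]).1.length : Int),
       (pvAbfs g W H (some ch) (5 * (W * H).toNat + 2) PySem.Set.empty 0 PySem.Set.empty [pos]).2.1) := by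
    unfold pvAexplore
    rw [h]
  obtain ⟨i1, i2, i3, i4, i5, Δ, hΔ, hperim⟩ := hkey
  rw [hexp]
  refine ⟨i1, fun q => ⟨fun hq => ?_, fun hq => ?_⟩, rfl, ?_⟩
  · rcases i3 q hq with hq' | ⟨s, hs, hr⟩
    · simp [PySem.Set.empty] at hq'
    · rwa [List.mem_singleton.mp hs] at hr
  · exact reach_subset_of_closed g W H (some ch) _ pos (i2 pos (by simp)) i4 q hq
  · have : Δ = (pvAbfs g W H (some ch) (5 * (W * H).toNat + 2)
        PySem.Set.empty 0 PySem.Set.empty [pos]).1 := by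
      rw [hΔ]; simp [PySem.Set.empty]
    rw [hperim, this]
    simp

-- membership in a conditional add-fold
theorem mem_foldl_add_if {α : Type} [BEq α] [LawfulBEq α] (cond : α → Bool) (ns : List α) :
    ∀ (acc : PySem.Set α), acc.Nodup →
    ((ns.foldl (fun a n => if cond n then PySem.Set.add a n else a) acc).Nodup ∧
     ∀ y, y ∈ ns.foldl (fun a n => if cond n then PySem.Set.add a n else a) acc ↔
          y ∈ acc ∨ (y ∈ ns ∧ cond y)) := by
  induction ns with
  | nil => intro acc hnd; simpa using hnd
  | cons n ns ih =>
    intro acc hnd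
    by_cases h : cond n = true
    · simp only [List.foldl_cons, if_pos h]
      obtain ⟨h1, h2⟩ := ih (PySem.Set.add acc n) (PySem.Set.nodup_add _ _ hnd)
      refine ⟨h1, fun y => ?_⟩
      rw [h2 y, PySem.Set.mem_add]
      have hy : y = n → cond y = true := fun e => e ▸ h
      constructor
      · rintro ((hy1 | rfl) | ⟨hy1, hy2⟩)
        · exact Or.inl hy1
        · exact Or.inr ⟨by simp, h⟩
        · exact Or.inr ⟨by simp [hy1], hy2⟩
      · rintro (hy1 | ⟨hy1, hy2⟩)
        · exact Or.inl (Or.inl hy1)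
        · rcases List.mem_cons.mp hy1 with rfl | hmem
          · exact Or.inl (Or.inr rfl)
          · exact Or.inr ⟨hmem, hy2⟩
    · simp only [List.foldl_cons, if_neg h]
      obtain ⟨h1, h2⟩ := ih acc hnd
      refine ⟨h1, fun y => ?_⟩
      rw [h2 y]
      constructor
      · rintro (hy1 | ⟨hy1, hy2⟩)
        · exact Or.inl hy1
        · exact Or.inr ⟨List.mem_cons_of_mem _ hy1, hy2⟩
      · rintro (hy1 | ⟨hy1, hy2⟩)
        · exact Or.inl hy1
        · rcases List.mem_cons.mp hy1 with rfl | hmem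
          · exact absurd hy2 h
          · exact Or.inr ⟨hmem, hy2⟩

theorem foldl_nbrs_add_if (cond : (Int × Int) → Bool) :
    ∀ (cs : List (Int × Int)) (acc : PySem.Set (Int × Int)), acc.Nodup →
    ((cs.foldl (fun a c => (pvNbrs c).foldl
        (fun a n => if cond n then PySem.Set.add a n else a) a) acc).Nodup ∧
     ∀ y, y ∈ cs.foldl (fun a c => (pvNbrs c).foldl
        (fun a n => if cond n then PySem.Set.add a n else a) a) acc ↔
        y ∈ acc ∨ ∃ c ∈ cs, y ∈ pvNbrs c ∧ cond y = true) := by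
  intro cs
  induction cs with
  | nil => intro acc hnd; simpa using hnd
  | cons c cs ih =>
    intro acc hnd
    simp only [List.foldl_cons]
    obtain ⟨h1, h2⟩ := mem_foldl_add_if cond (pvNbrs c) acc hnd
    obtain ⟨h3, h4⟩ := ih _ h1
    refine ⟨h3, fun y => ?_⟩
    rw [h4 y, h2 y]
    simp only [List.mem_cons]
    constructor
    · rintro ((hy | ⟨hn, hc⟩) | ⟨c', hc', hn, hcond⟩)
      · exact Or.inl hy
      · exact Or.inr ⟨c, Or.inl rfl, hn, hc⟩
      · exact Or.inr ⟨c', Or.inr hc', hn, hcond⟩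
    · rintro (hy | ⟨c', (rfl | hc'), hn, hcond⟩)
      · exact Or.inl (Or.inl hy)
      · exact Or.inl (Or.inr ⟨hn, hcond⟩)
      · exact Or.inr ⟨c', hc', hn, hcond⟩

theorem pvBgrow_spec (g : List (List Char)) (W H : Int) (plant : Option Char)
    (cells : PySem.Set (Int × Int)) :
    (pvBgrow g W H plant cells).Nodup ∧
    ∀ y, y ∈ pvBgrow g W H plant cells ↔
      (∃ c ∈ cells, y ∈ pvNbrs c) ∧ y ∉ cells ∧ pvGet g W H y = plant := by
  unfold pvBgrow
  obtain ⟨h1, h2⟩ := foldl_nbrs_add_if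
    (fun n => !(PySem.Set.contains cells n) && (pvGet g W H n == plant)) cells
    PySem.Set.empty List.nodup_nil
  refine ⟨h1, fun y => ?_⟩
  rw [h2 y]
  have hc : ∀ n : Int × Int,
      ((!(PySem.Set.contains cells n) && (pvGet g W H n == plant)) = true) ↔
      (n ∉ cells ∧ pvGet g W H n = plant) := by
    intro n
    rw [Bool.and_eq_true, Bool.not_eq_true']
    constructor
    · rintro ⟨ha, hb⟩
      refine ⟨fun hmem => ?_, eq_of_beq hb⟩
      simp only [PySem.Set.contains_eq_listContains, List.contains_eq_mem,
        decide_eq_false_iff_not] at ha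
      exact ha hmem
    · rintro ⟨ha, hb⟩
      refine ⟨?_, by simp [hb]⟩
      cases hm : PySem.Set.contains cells n
      · rfl
      · exact absurd ((PySem.Set.contains_iff cells n).mp hm) ha
  constructor
  · rintro (hy | ⟨c, hc', hn, hcond⟩)
    · simp at hy
    · exact ⟨⟨c, hc', hn⟩, (hc y).mp hcond⟩
  · rintro ⟨⟨c, hc', hn⟩, hnot, hpl⟩
    exact Or.inr ⟨c, hc', hn, (hc y).mpr ⟨hnot, hpl⟩⟩

theorem pvBsat_spec (g : List (List Char)) (W H : Int) (ch : Char) (plant : Option Char)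
    (hch : plant = some ch) :
    ∀ (fuel : Nat) (cells : PySem.Set (Int × Int)),
    cells.Nodup → (∀ q ∈ cells, pvInB W H q) →
    (W * H).toNat - cells.length < fuel →
    (pvBsat g W H plant fuel cells).Nodup ∧
    (∀ q ∈ cells, q ∈ pvBsat g W H plant fuel cells) ∧
    (∀ q ∈ pvBsat g W H plant fuel cells, q ∈ cells ∨ ∃ s ∈ cells, pvReach g W H plant s q) ∧
    (∀ p ∈ pvBsat g W H plant fuel cells, ∀ n ∈ pvNbrs p,
        pvGet g W H n = plant → n ∈ pvBsat g W H plant fuel cells) := by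
  intro fuel
  induction fuel with
  | zero => intro cells _ _ hf; omega
  | succ f ih =>
    intro cells hnd hin hf
    obtain ⟨hgnd, hgmem⟩ := pvBgrow_spec g W H plant cells
    by_cases hg : pvBgrow g W H plant cells = []
    · simp only [pvBsat, if_pos hg]
      refine ⟨hnd, fun q hq => hq, fun q hq => Or.inl hq, fun p hp n hn hplant => ?_⟩
      by_cases hmem : n ∈ cells
      · exact hmem
      · have : n ∈ pvBgrow g W H plant cells :=
          (hgmem n).mpr ⟨⟨p, hp, hn⟩, hmem, hplant⟩
        rw [hg] at this
        simp at this
    · simp only [pvBsat, if_neg hg]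
      have hdis : ∀ x ∈ pvBgrow g W H plant cells, x ∉ cells :=
        fun x hx => ((hgmem x).mp hx).2.1
      have hunion : PySem.Set.union cells (pvBgrow g W H plant cells)
          = cells ++ pvBgrow g W H plant cells :=
        PySem.Set.update_eq_append_of_disjoint cells _ hgnd hdis
      have hnd' : (PySem.Set.union cells (pvBgrow g W H plant cells)).Nodup :=
        PySem.Set.nodup_union _ _ hnd
      have hin' : ∀ q ∈ PySem.Set.union cells (pvBgrow g W H plant cells), pvInB W H q := by
        intro q hq
        rcases (PySem.Set.mem_union _ _ q).mp hq with h | h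
        · exact hin q h
        · have := ((hgmem q).mp h).2.2
          rw [hch] at this
          exact pvAget_some_inB this
      have hlen : (PySem.Set.union cells (pvBgrow g W H plant cells)).length ≤ (W * H).toNat :=
        nodup_inb_length_le W H _ hnd' hin'
      have hgrow : cells.length < (PySem.Set.union cells (pvBgrow g W H plant cells)).length := by
        rw [hunion, List.length_append]
        have : 0 < (pvBgrow g W H plant cells).length := List.length_pos_iff.mpr hg
        omega
      have hf' : (W * H).toNat - (PySem.Set.union cells (pvBgrow g W H plant cells)).length < f := by
        omega
      obtain ⟨i1, i2, i3, i4⟩ := ih _ hnd' hin' hf'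
      have hstep : ∀ s ∈ pvBgrow g W H plant cells, ∃ c ∈ cells, pvReach g W H plant c s := by
        intro s hs
        obtain ⟨⟨c, hc, hn⟩, _, hplant⟩ := (hgmem s).mp hs
        exact ⟨c, hc, Relation.ReflTransGen.single ⟨hn, hplant⟩⟩
      refine ⟨i1, fun q hq => i2 q ((PySem.Set.mem_union _ _ q).mpr (Or.inl hq)), ?_, i4⟩
      intro q hq
      rcases i3 q hq with h | ⟨s, hs, hr⟩
      · rcases (PySem.Set.mem_union _ _ q).mp h with h' | h'
        · exact Or.inl h'
        · obtain ⟨c, hc, hr'⟩ := hstep q h'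
          exact Or.inr ⟨c, hc, hr'⟩
      · rcases (PySem.Set.mem_union _ _ s).mp hs with h' | h'
        · exact Or.inr ⟨s, h', hr⟩
        · obtain ⟨c, hc, hr'⟩ := hstep s h'
          exact Or.inr ⟨c, hc, hr'.trans hr⟩

theorem pvBregion_spec (g : List (List Char)) (W H : Int) (pos : Int × Int) (ch : Char)
    (h : pvGet g W H pos = some ch) :
    (pvBregion g W H pos (some ch)).Nodup ∧
    (∀ q, q ∈ pvBregion g W H pos (some ch) ↔ pvReach g W H (some ch) pos q) := by
  have hstart : PySem.Set.add PySem.Set.empty pos = [pos] := rfl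
  have hkey := pvBsat_spec g W H ch (some ch) rfl ((W * H).toNat + 1)
    (PySem.Set.add PySem.Set.empty pos)
    (by rw [hstart]; exact List.nodup_singleton _)
    (by rw [hstart]; intro q hq; rw [List.mem_singleton.mp hq]; exact pvAget_some_inB h)
    (by rw [hstart]; simp only [List.length_cons, List.length_nil]; omega)
  obtain ⟨i1, i2, i3, i4⟩ := hkey
  unfold pvBregion
  refine ⟨i1, fun q => ⟨fun hq => ?_, fun hq => ?_⟩⟩
  · rcases i3 q hq with h' | ⟨s, hs, hr⟩
    · rw [hstart] at h'
      rw [List.mem_singleton.mp h']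
      exact Relation.ReflTransGen.refl
    · rw [hstart] at hs
      rwa [List.mem_singleton.mp hs] at hr
  · exact reach_subset_of_closed g W H (some ch) _ pos
      (i2 pos (by rw [hstart]; simp)) i4 q hq

theorem pvBperim_eq (g : List (List Char)) (W H : Int) (plant : Option Char)
    (cells : List (Int × Int)) :
    pvBperim g W H plant cells = ((cells.map (fun d => (pvBnd g W H plant d : Int))).sum) := by
  unfold pvBperim
  rw [PySem.List.foldl_add]
  simp [pvBnd, List.countP_eq_length_filter]

-- with Pre_, every in-bounds position holds a character
theorem pvAget_inB_some (g : List (List Char)) (W H : Int) (p : Int × Int)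
    (hH : H = (g.length : Int)) (hW : W = ((g.headD []).length : Int))
    (hrows : ∀ l ∈ g, (g.headD []).length ≤ l.length)
    (hin : pvInB W H p) : ∃ c, pvGet g W H p = some c := by
  obtain ⟨hx0, hxW, hy0, hyH⟩ := hin
  have hy : p.2.toNat < g.length := by omega
  have hrow : PySem.List.pyGet? g p.2 = some g[p.2.toNat] :=
    PySem.List.pyGet?_eq_some_getElem g hy0 (by omega)
  have hmem : g[p.2.toNat] ∈ g := List.getElem_mem hy
  have hlen : p.1.toNat < (g[p.2.toNat]).length := by
    have := hrows _ hmem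
    omega
  have hcell : PySem.List.pyGet? g[p.2.toNat] p.1 = some (g[p.2.toNat])[p.1.toNat] :=
    PySem.List.pyGet?_eq_some_getElem _ hx0 (by omega)
  refine ⟨(g[p.2.toNat])[p.1.toNat], ?_⟩
  unfold pvGet
  rw [if_pos ⟨hx0, hxW, hy0, hyH⟩, hrow]
  simpa using hcell

-- the two region computations agree (same member set, so same area and same perimeter)
theorem region_agree (g : List (List Char)) (W H : Int) (pos : Int × Int) (ch : Char)
    (h : pvGet g W H pos = some ch) :
    (∀ q, q ∈ (pvAexplore g W H pos).1 ↔ q ∈ pvBregion g W H pos (some ch)) ∧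
    (pvAexplore g W H pos).2.1 = ((pvBregion g W H pos (some ch)).length : Int) ∧
    (pvAexplore g W H pos).2.2 = pvBperim g W H (some ch) (pvBregion g W H pos (some ch)) := by
  obtain ⟨a1, a2, a3, a4⟩ := pvAexplore_spec g W H pos ch h
  obtain ⟨b1, b2⟩ := pvBregion_spec g W H pos ch h
  have hmem : ∀ q, q ∈ (pvAexplore g W H pos).1 ↔ q ∈ pvBregion g W H pos (some ch) := by
    intro q; rw [a2 q, b2 q]
  have hperm : (pvAexplore g W H pos).1.Perm (pvBregion g W H pos (some ch)) :=
    (List.perm_ext_iff_of_nodup a1 b1).mpr hmem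
  refine ⟨hmem, ?_, ?_⟩
  · rw [a3, hperm.length_eq]
  · rw [a4, pvBperim_eq, (hperm.map _).sum_eq]

-- loop bodies of the two main scans (defeq to the lambdas inside the ports)
def pvAbody (g : List (List Char)) (W H : Int) (y : Int)
    (st : PySem.Set (Int × Int) × Int) (x : Int) : PySem.Set (Int × Int) × Int :=
  if (x, y) ∈ st.1 then st
  else
    let r := pvAexplore g W H (x, y)
    (PySem.Set.union st.1 r.1, st.2 + r.2.1 * r.2.2)

def pvBbody (g : List (List Char)) (W H : Int) (y : Int)
    (st : PySem.Set (Int × Int) × Int) (x : Int) : PySem.Set (Int × Int) × Int :=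
  if (x, y) ∈ st.1 then st
  else
    let plant := pvGet g W H (x, y)
    let cells := pvBregion g W H (x, y) plant
    (PySem.Set.union st.1 cells, st.2 + (cells.length : Int) * pvBperim g W H plant cells)

theorem inner_fold_agree (g : List (List Char)) (W H : Int)
    (hH : H = (g.length : Int)) (hW : W = ((g.headD []).length : Int))
    (hrows : ∀ l ∈ g, (g.headD []).length ≤ l.length) (y : Int) (hy : 0 ≤ y ∧ y < H) :
    ∀ (xs : List Int), (∀ x ∈ xs, 0 ≤ x ∧ x < W) →
    ∀ (sa sb : PySem.Set (Int × Int) × Int),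
    sa.2 = sb.2 → sa.1.Nodup → sb.1.Nodup → (∀ q, q ∈ sa.1 ↔ q ∈ sb.1) →
    (xs.foldl (pvAbody g W H y) sa).2 = (xs.foldl (pvBbody g W H y) sb).2 ∧
    (xs.foldl (pvAbody g W H y) sa).1.Nodup ∧
    (xs.foldl (pvBbody g W H y) sb).1.Nodup ∧
    (∀ q, q ∈ (xs.foldl (pvAbody g W H y) sa).1 ↔ q ∈ (xs.foldl (pvBbody g W H y) sb).1) := by
  intro xs
  induction xs with
  | nil => intro _ sa sb h1 h2 h3 h4; exact ⟨h1, h2, h3, h4⟩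
  | cons x xs ihx =>
    intro hxs sa sb h1 h2 h3 h4
    have hx := hxs x (by simp)
    simp only [List.foldl_cons]
    by_cases hm : (x, y) ∈ sa.1
    · have hm' : (x, y) ∈ sb.1 := (h4 (x, y)).mp hm
      rw [show pvAbody g W H y sa x = sa from by simp [pvAbody, hm],
          show pvBbody g W H y sb x = sb from by simp [pvBbody, hm']]
      exact ihx (fun x' hx' => hxs x' (List.mem_cons_of_mem _ hx')) sa sb h1 h2 h3 h4
    · have hm' : (x, y) ∉ sb.1 := fun hmem => hm ((h4 (x, y)).mpr hmem)
      obtain ⟨ch, hch⟩ := pvAget_inB_some g W H (x, y) hH hW hrows ⟨hx.1, hx.2, hy.1, hy.2⟩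
      have hplantB : pvGet g W H (x, y) = some ch := hch
      obtain ⟨rm, ra, rp⟩ := region_agree g W H (x, y) ch hch
      have hA : pvAbody g W H y sa x =
          (PySem.Set.union sa.1 (pvAexplore g W H (x, y)).1,
           sa.2 + (pvAexplore g W H (x, y)).2.1 * (pvAexplore g W H (x, y)).2.2) := by
        simp [pvAbody, hm]
      have hB : pvBbody g W H y sb x =
          (PySem.Set.union sb.1 (pvBregion g W H (x, y) (some ch)),
           sb.2 + ((pvBregion g W H (x, y) (some ch)).length : Int) *
             pvBperim g W H (some ch) (pvBregion g W H (x, y) (some ch))) := by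
        simp only [pvBbody, hplantB]
        rw [if_neg hm']
      rw [hA, hB]
      refine ihx (fun x' hx' => hxs x' (List.mem_cons_of_mem _ hx')) _ _ ?_ ?_ ?_ ?_
      · simp only []
        rw [h1, ra, rp]
      · exact PySem.Set.nodup_union _ _ h2
      · exact PySem.Set.nodup_union _ _ h3
      · intro q
        simp only []
        rw [PySem.Set.mem_union, PySem.Set.mem_union]
        rw [h4 q, rm q]

theorem outer_fold_agree (g : List (List Char)) (W H : Int)
    (hH : H = (g.length : Int)) (hW : W = ((g.headD []).length : Int))
    (hrows : ∀ l ∈ g, (g.headD []).length ≤ l.length) :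
    ∀ (ys : List Int), (∀ y ∈ ys, 0 ≤ y ∧ y < H) →
    ∀ (sa sb : PySem.Set (Int × Int) × Int),
    sa.2 = sb.2 → sa.1.Nodup → sb.1.Nodup → (∀ q, q ∈ sa.1 ↔ q ∈ sb.1) →
    (ys.foldl (fun st y => (PySem.List.pyRange 0 W 1).foldl (pvAbody g W H y) st) sa).2
      = (ys.foldl (fun st y => (PySem.List.pyRange 0 W 1).foldl (pvBbody g W H y) st) sb).2 ∧
    (ys.foldl (fun st y => (PySem.List.pyRange 0 W 1).foldl (pvAbody g W H y) st) sa).1.Nodup ∧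
    (ys.foldl (fun st y => (PySem.List.pyRange 0 W 1).foldl (pvBbody g W H y) st) sb).1.Nodup ∧
    (∀ q, q ∈ (ys.foldl (fun st y => (PySem.List.pyRange 0 W 1).foldl (pvAbody g W H y) st) sa).1
        ↔ q ∈ (ys.foldl (fun st y => (PySem.List.pyRange 0 W 1).foldl (pvBbody g W H y) st) sb).1) := by
  intro ys
  induction ys with
  | nil => intro _ sa sb h1 h2 h3 h4; exact ⟨h1, h2, h3, h4⟩
  | cons y ys ihy =>
    intro hys sa sb h1 h2 h3 h4
    simp only [List.foldl_cons]
    obtain ⟨j1, j2, j3, j4⟩ := inner_fold_agree g W H hH hW hrows y (hys y (by simp))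
      (PySem.List.pyRange 0 W 1)
      (fun x hx => (PySem.List.mem_pyRange_one.mp hx))
      sa sb h1 h2 h3 h4
    exact ihy (fun y' hy' => hys y' (List.mem_cons_of_mem _ hy')) _ _ j1 j2 j3 j4

-- ===== VERDICT (by name: the statement is the Claim_ definition above) =====
theorem part_1_spec : Claim_equal_part_1 := by
  unfold Claim_equal_part_1
  intro string hdom hpre
  unfold Spec_part_1
  obtain ⟨hne, hrows⟩ := hpre
  exact (outer_fold_agree (pvGrid string)
      (((pvGrid string).headD []).length : Int) (((pvGrid string).length : Int))
      rfl rfl hrows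
      (PySem.List.pyRange 0 ((pvGrid string).length : Int) 1)
      (fun y hy => PySem.List.mem_pyRange_one.mp hy)
      (PySem.Set.empty, 0) (PySem.Set.empty, 0)
      rfl List.nodup_nil List.nodup_nil (fun q => Iff.rfl)).1
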